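-- pv_equiv track=rewrite | github.com/donatienLeray/AdventOfCode-2021 | aoc13_2.py | get_max_xy
-- ===== SOURCE A (Python) =====
-- def get_max_xy(set):
--     max_x = 0
--     max_y = 0
--     for e in set:
--         x,y = e
--         if x > max_x:
--             max_x = x
--         if y > max_y:
--             max_y = y
--     return (max_x,max_y)
-- ===== SOURCE B (Python) =====
-- def get_max_xy(set):
--     return _dc_max(list(set))
--
-- def _dc_max(pts):
--     if not pts:
--         return (0, 0)
--     if len(pts) == 1:
--         x, y = pts[0]
--         return (max(x, 0), max(y, 0))
--     mid = len(pts) // 2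
--     lx, ly = _dc_max(pts[:mid])
--     rx, ry = _dc_max(pts[mid:])
--     return (max(lx, rx), max(ly, ry))
-- ===== Notes on version B (the rewrite author's own statement) =====
-- stated objective: alternative
-- what changed: Replaces the single-pass running-maximum loop by a divide-and-conquer recursion that splits the list in halves, solves each half recursively (flooring at 0 in the single-point base case) and merges the child maxima with max.
import Mathlib
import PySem

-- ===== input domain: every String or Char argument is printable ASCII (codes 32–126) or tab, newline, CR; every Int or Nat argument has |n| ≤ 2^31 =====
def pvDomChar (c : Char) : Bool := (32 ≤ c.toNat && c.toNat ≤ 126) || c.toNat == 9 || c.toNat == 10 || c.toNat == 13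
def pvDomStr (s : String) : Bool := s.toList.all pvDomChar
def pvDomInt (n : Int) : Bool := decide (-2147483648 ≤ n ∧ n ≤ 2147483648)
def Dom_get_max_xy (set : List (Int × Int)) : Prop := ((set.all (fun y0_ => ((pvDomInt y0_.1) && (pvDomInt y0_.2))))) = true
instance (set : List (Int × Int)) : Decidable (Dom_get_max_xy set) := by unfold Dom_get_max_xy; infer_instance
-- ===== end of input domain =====

-- B replaces A's single running-maximum loop by a divide-and-conquer recursion on list halves (alternative decomposition, not faster).

-- ===== PORT A =====
def get_max_xy (set : List (Int × Int)) : Int × Int :=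
  set.foldl (fun (m : Int × Int) e =>
    let max_x := if e.1 > m.1 then e.1 else m.1
    let max_y := if e.2 > m.2 then e.2 else m.2
    (max_x, max_y)) (0, 0)

-- ===== PORT B =====
-- set[:mid] / set[mid:] with 0 ≤ mid ≤ len are exactly List.take mid / List.drop mid;
-- list(set) on the List argument is the identity.
def pvDcMax : List (Int × Int) → Int × Int
  | [] => (0, 0)
  | [(x, y)] => (max x 0, max y 0)
  | p :: q :: t =>
    let s := p :: q :: t
    let mid := s.length / 2
    let l := pvDcMax (s.take mid)
    let r := pvDcMax (s.drop mid)
    (max l.1 r.1, max l.2 r.2)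
  termination_by s => s.length
  decreasing_by
  · simp [List.length_take]; omega
  · simp [List.length_drop]; omega

def get_max_xy_alt (set : List (Int × Int)) : Int × Int := pvDcMax set

-- ===== PRECONDITION & SPEC =====
def Spec_get_max_xy (set : List (Int × Int)) (out : Int × Int) : Prop := out = get_max_xy_alt set
instance (set : List (Int × Int)) (out : Int × Int) : Decidable (Spec_get_max_xy set out) := by unfold Spec_get_max_xy; infer_instance

-- ===== CLAIM (what is proved, stated in full; the proofs are below) =====
def Claim_equal_get_max_xy : Prop := ∀ (set : List (Int × Int)), Dom_get_max_xy set → Spec_get_max_xy set (get_max_xy set)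

-- ===== LEMMAS AND PROOFS =====
theorem foldl_max_init (l : List Int) (a b : Int) :
    l.foldl max (max a b) = max a (l.foldl max b) := by
  induction l generalizing b with
  | nil => rfl
  | cons x t ih => simp only [List.foldl_cons, max_assoc, ih]

theorem zero_le_foldl_max (l : List Int) : 0 ≤ l.foldl max 0 := by
  have h : ∀ (l : List Int) (a : Int), a ≤ l.foldl max a := by
    intro l
    induction l with
    | nil => intro a; exact le_refl a
    | cons x t ih => intro a; exact le_trans (le_max_left a x) (ih (max a x))
  exact h l 0

theorem foldl_max_append (l1 l2 : List Int) :
    (l1 ++ l2).foldl max 0 = max (l1.foldl max 0) (l2.foldl max 0) := by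
  rw [List.foldl_append]
  have h0 : (0 : Int) ≤ l1.foldl max 0 := zero_le_foldl_max l1
  calc l2.foldl max (l1.foldl max 0)
      = l2.foldl max (max (l1.foldl max 0) 0) := by rw [max_eq_left h0]
    _ = max (l1.foldl max 0) (l2.foldl max 0) := foldl_max_init l2 _ 0

theorem pvDcMax_eq (s : List (Int × Int)) :
    pvDcMax s = ((s.map Prod.fst).foldl max 0, (s.map Prod.snd).foldl max 0) := by
  fun_induction pvDcMax s with
  | case1 => rfl
  | case2 x y => simp [max_comm]
  | case3 p q t s mid l r iht ihd =>
    change (max (pvDcMax (List.take mid s)).1 (pvDcMax (List.drop mid s)).1,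
            max (pvDcMax (List.take mid s)).2 (pvDcMax (List.drop mid s)).2) = _
    rw [iht, ihd]
    have hsplit : (p :: q :: t) = (p :: q :: t).take ((p :: q :: t).length / 2)
        ++ (p :: q :: t).drop ((p :: q :: t).length / 2) := (List.take_append_drop _ _).symm
    refine Prod.ext ?_ ?_ <;>
      (conv_rhs => rw [hsplit]) <;> simp only [List.map_append, foldl_max_append] <;> rfl

theorem get_max_xy_foldl (l : List (Int × Int)) (a b : Int) :
    l.foldl (fun (m : Int × Int) e =>
      let max_x := if e.1 > m.1 then e.1 else m.1
      let max_y := if e.2 > m.2 then e.2 else m.2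
      (max_x, max_y)) (a, b)
    = ((l.map Prod.fst).foldl max a, (l.map Prod.snd).foldl max b) := by
  induction l generalizing a b with
  | nil => rfl
  | cons e t ih =>
      simp only [List.foldl_cons, List.map_cons, ih]
      congr 1 <;> · congr 1; simp [max_def]; split_ifs <;> omega

-- ===== VERDICT (by name: the statement is the Claim_ definition above) =====
theorem get_max_xy_spec : Claim_equal_get_max_xy := by
  intro set _
  unfold Spec_get_max_xy get_max_xy get_max_xy_alt
  rw [pvDcMax_eq, get_max_xy_foldl]
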